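-- pv_equiv track=rewrite | github.com/Bernabe2001/Chessape | Models/pawn_structure_value_generator.py | count_islands_and_isolated
-- ===== SOURCE A (Python) =====
-- def count_islands_and_isolated(n):
--     """
--     Given an integer n (0 <= n < 256), computes the score for its 8-bit binary representation.
--     The score is defined as:
--       score = (# of islands) + (# of islands that are isolated)
--     where an island is a contiguous group of '1's and an isolated pawn is an island of length 1.
--
--     For example, for the binary '10011000':
--       - There are 2 islands: "1" and "11"
--       - Only "1" is isolated (length 1)
--       - Score = 2 + 1 = 3
--     """
--     binary = format(n, '08b')
--     islands = 0
--     isolated = 0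
--     in_island = False
--     current_length = 0
--
--     for char in binary:
--         if char == '1':
--             if not in_island:
--                 # Start of a new island
--                 islands += 1
--                 in_island = True
--                 current_length = 1
--             else:
--                 # Continuation of the current island
--                 current_length += 1
--         else:
--             if in_island:
--                 # End of an island: check if it was isolated
--                 if current_length == 1:
--                     isolated += 1
--                 in_island = False
--                 current_length = 0
--
--     # If the binary string ended while still in an island, check its length.
--     if in_island and current_length == 1:
--         isolated += 1
--
--     return islands + isolated
-- ===== SOURCE B (Python) =====
-- def count_islands_and_isolated(n):
--     binary = format(n, '08b')
--     # materialize the maximal runs of '1': blank out every other char, then split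
--     runs = ''.join(c if c == '1' else ' ' for c in binary).split()
--     return len(runs) + sum(1 for r in runs if len(r) == 1)
-- ===== Notes on version B (the rewrite author's own statement) =====
-- stated objective: idiomatic
-- what changed: Replaces the single-pass explicit state machine (in_island/current_length flags with an end-of-string fixup) by first materializing the list of maximal '1'-runs (mask non-'1' chars to spaces, then str.split) and then counting runs and length-1 runs in two shaped passes.
import Mathlib
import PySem

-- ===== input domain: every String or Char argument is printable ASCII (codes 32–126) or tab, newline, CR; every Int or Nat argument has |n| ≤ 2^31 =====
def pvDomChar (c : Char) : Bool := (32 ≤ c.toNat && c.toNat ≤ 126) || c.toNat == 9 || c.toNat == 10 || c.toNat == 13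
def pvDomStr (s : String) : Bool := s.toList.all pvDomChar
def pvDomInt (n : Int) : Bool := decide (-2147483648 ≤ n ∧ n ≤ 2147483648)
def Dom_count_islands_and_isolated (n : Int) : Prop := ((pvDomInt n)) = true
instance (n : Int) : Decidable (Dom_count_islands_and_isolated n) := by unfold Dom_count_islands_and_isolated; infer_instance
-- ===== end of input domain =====

-- B replaces A's single-pass in_island/current_length state machine by materializing
-- the list of maximal '1'-runs and counting them in two passes (objective: idiomatic).

-- ===== PORT A =====
-- format(n, '08b'): binary digits, '-' first for negatives, zero-padded to total width 8
def pvFormat08b (n : Int) : List Char :=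
  match PySem.Int.toBinChars n with
  | '-' :: rest => '-' :: (List.replicate (7 - rest.length) '0' ++ rest)
  | ds => List.replicate (8 - ds.length) '0' ++ ds

-- the body of A's for-loop, on state (islands, isolated, in_island, current_length)
def pvStepA (st : Int × Int × Bool × Int) (c : Char) : Int × Int × Bool × Int :=
  match st with
  | (islands, isolated, inIsland, curLen) =>
    if c = '1' then
      if !inIsland then (islands + 1, isolated, true, 1)
      else (islands, isolated, inIsland, curLen + 1)
    else
      if inIsland then (islands, if curLen = 1 then isolated + 1 else isolated, false, 0)
      else (islands, isolated, inIsland, curLen)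

def count_islands_and_isolated (n : Int) : Int :=
  let binary := pvFormat08b n
  match binary.foldl pvStepA ((0 : Int), (0 : Int), false, (0 : Int)) with
  | (islands, isolated, inIsland, curLen) =>
    islands + (if inIsland ∧ curLen = 1 then isolated + 1 else isolated)

-- ===== PORT B =====
def count_islands_and_isolated_alt (n : Int) : Int :=
  let binary := pvFormat08b n
  let runs := PySem.Chars.split₀ (binary.map (fun c => if c = '1' then c else ' '))
  (runs.length : Int) + ((runs.filter (fun r => r.length == 1)).length : Int)

-- ===== PRECONDITION & SPEC =====
def Spec_count_islands_and_isolated (n : Int) (out : Int) : Prop := out = count_islands_and_isolated_alt n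
instance (n : Int) (out : Int) : Decidable (Spec_count_islands_and_isolated n out) := by unfold Spec_count_islands_and_isolated; infer_instance

-- ===== CLAIM (what is proved, stated in full; the proofs are below) =====
def Claim_equal_count_islands_and_isolated : Prop := ∀ (n : Int), Dom_count_islands_and_isolated n → Spec_count_islands_and_isolated n (count_islands_and_isolated n)

-- ===== LEMMAS AND PROOFS =====

-- the maximal runs of '1' in a character list (proof-side reference object)
def pvOnesRuns : List Char → List (List Char)
  | [] => []
  | c :: cs =>
    if c = '1' then ('1' :: cs.takeWhile (· = '1')) :: pvOnesRuns (cs.dropWhile (· = '1'))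
    else pvOnesRuns cs
termination_by cs => cs.length
decreasing_by
  · exact Nat.lt_succ_of_le (cs.length_dropWhile_le _)
  · exact Nat.lt_succ_self _

def pvScore (rs : List (List Char)) : Int :=
  (rs.length : Int) + ((rs.filter (fun r => r.length == 1)).length : Int)

def pvFinishA (st : Int × Int × Bool × Int) : Int :=
  match st with
  | (islands, isolated, inIsland, curLen) =>
    islands + (if inIsland ∧ curLen = 1 then isolated + 1 else isolated)

theorem pvScore_cons (r : List Char) (rs : List (List Char)) :
    pvScore (r :: rs) = 1 + (if r.length = 1 then 1 else 0) + pvScore rs := by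
  simp only [pvScore, List.filter_cons]
  by_cases h : r.length = 1 <;> simp [h] <;> push_cast <;> ring

-- masking non-'1' chars to spaces does not change A's fold
theorem foldA_mask (cs : List Char) (st : Int × Int × Bool × Int) :
    (cs.map (fun c => if c = '1' then c else ' ')).foldl pvStepA st = cs.foldl pvStepA st := by
  induction cs generalizing st with
  | nil => rfl
  | cons c cs ih =>
    simp only [List.map_cons, List.foldl_cons]
    rw [ih]
    congr 1
    by_cases h : c = '1' <;> simp [pvStepA, h]

theorem stepA_one (i iso L : Int) (b : Bool) :
    pvStepA (i, iso, b, L) '1' = (if b then (i, iso, true, L + 1) else (i + 1, iso, true, 1)) := by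
  cases b <;> simp [pvStepA]

theorem stepA_other (i iso L : Int) (b : Bool) (c : Char) (hc : c ≠ '1') :
    pvStepA (i, iso, b, L) c =
      (if b then (i, if L = 1 then iso + 1 else iso, false, 0) else (i, iso, b, L)) := by
  cases b <;> simp [pvStepA, hc]

-- A's state machine computes the run-based score (both the out-of-island and in-island states)
theorem foldA_score : ∀ (N : Nat) (cs : List Char), cs.length ≤ N → ∀ (i iso : Int),
    (pvFinishA (cs.foldl pvStepA (i, iso, false, (0 : Int))) = i + iso + pvScore (pvOnesRuns cs)) ∧
    (∀ L : Int, pvFinishA (cs.foldl pvStepA (i, iso, true, L)) =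
      i + iso + (if L + ((cs.takeWhile (· = '1')).length : Int) = 1 then 1 else 0)
        + pvScore (pvOnesRuns (cs.dropWhile (· = '1')))) := by
  intro N
  induction N with
  | zero =>
    intro cs h i iso
    rw [List.length_eq_zero_iff.mp (Nat.le_zero.mp h)]
    constructor
    · simp [pvFinishA, pvScore, pvOnesRuns]
    · intro L
      simp only [List.foldl_nil, List.takeWhile_nil, List.dropWhile_nil, pvOnesRuns]
      simp only [pvFinishA, pvScore, List.length_nil, Nat.cast_zero, add_zero,
        List.filter_nil]
      by_cases hL : L = 1 <;> simp [hL] <;> ring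
  | succ N ih =>
    intro cs h i iso
    match cs with
    | [] =>
      constructor
      · simp [pvFinishA, pvScore, pvOnesRuns]
      · intro L
        simp only [List.foldl_nil, List.takeWhile_nil, List.dropWhile_nil, pvOnesRuns]
        simp only [pvFinishA, pvScore, List.length_nil, Nat.cast_zero, add_zero,
          List.filter_nil]
        by_cases hL : L = 1 <;> simp [hL] <;> ring
    | c :: rest =>
      have hr : rest.length ≤ N := Nat.lt_succ_iff.mp (Nat.lt_of_lt_of_le (Nat.lt_succ_self _) h)
      constructor
      · -- out-of-island state
        by_cases hc : c = '1'
        · subst hc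
          rw [List.foldl_cons, stepA_one, if_neg (by simp)]
          rw [(ih rest hr (i + 1) iso).2 1]
          rw [pvOnesRuns, if_pos rfl, pvScore_cons]
          have htw : ((1 : Int) + ((rest.takeWhile (· = '1')).length : Int) = 1)
              ↔ (('1' :: rest.takeWhile (· = '1')).length = 1) := by
            simp only [List.length_cons]; omega
          by_cases he : ('1' :: rest.takeWhile (· = '1')).length = 1
          · rw [if_pos (htw.mpr he), if_pos he]; ring
          · rw [if_neg (fun hh => he (htw.mp hh)), if_neg he]; ring
        · rw [List.foldl_cons, stepA_other i iso 0 false c hc, if_neg (by simp)]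
          rw [(ih rest hr i iso).1, pvOnesRuns, if_neg hc]
      · -- in-island state
        intro L
        by_cases hc : c = '1'
        · subst hc
          rw [List.foldl_cons, stepA_one, if_pos rfl]
          rw [(ih rest hr i iso).2 (L + 1)]
          rw [show ('1' :: rest).takeWhile (· = '1') = '1' :: rest.takeWhile (· = '1') by
            simp [List.takeWhile_cons]]
          rw [show ('1' :: rest).dropWhile (· = '1') = rest.dropWhile (· = '1') by
            simp [List.dropWhile_cons]]
          simp only [List.length_cons]
          congr 2
          by_cases hL : L + 1 + ((rest.takeWhile (· = '1')).length : Int) = 1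
          · rw [if_pos hL, if_pos (by push_cast; omega)]
          · rw [if_neg hL, if_neg (by push_cast; omega)]
        · rw [List.foldl_cons, stepA_other i iso L true c hc, if_pos rfl]
          rw [(ih rest hr i (if L = 1 then iso + 1 else iso)).1]
          rw [show (c :: rest).takeWhile (· = '1') = [] by simp [List.takeWhile_cons, hc]]
          rw [show (c :: rest).dropWhile (· = '1') = c :: rest by simp [List.dropWhile_cons, hc]]
          rw [pvOnesRuns, if_neg hc]
          simp only [List.length_nil, Nat.cast_zero, add_zero]
          by_cases hL : L = 1 <;> simp [hL] <;> ring

-- split₀ on a masked (only ' ' or '1') list produces exactly the '1'-runs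
theorem split₀_go_masked : ∀ (cs cur : List Char) (accs : List (List Char)),
    (∀ c ∈ cs, c = ' ' ∨ c = '1') →
    PySem.Chars.split₀.go cs cur accs =
      accs.reverse ++ (if cur = [] then pvOnesRuns cs
        else (cur.reverse ++ cs.takeWhile (· = '1')) :: pvOnesRuns (cs.dropWhile (· = '1'))) := by
  intro cs
  induction cs with
  | nil =>
    intro cur accs _
    by_cases hcur : cur = []
    · subst hcur; simp [PySem.Chars.split₀.go, pvOnesRuns]
    · simp [PySem.Chars.split₀.go, List.isEmpty_iff, hcur, pvOnesRuns]
  | cons c rest ih =>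
    intro cur accs h
    rcases h c List.mem_cons_self with hc | hc
    · subst hc
      have hsp : PySem.Chars.isspace ' ' = true := by decide
      have hrest : ∀ x ∈ rest, x = ' ' ∨ x = '1' := fun x hx => h x (List.mem_cons_of_mem _ hx)
      have hne : (' ' : Char) ≠ '1' := by decide
      by_cases hcur : cur = []
      · subst hcur
        rw [show PySem.Chars.split₀.go (' ' :: rest) [] accs
              = PySem.Chars.split₀.go rest [] accs by simp [PySem.Chars.split₀.go, hsp]]
        rw [ih [] accs hrest]
        simp [pvOnesRuns, hne]
      · rw [show PySem.Chars.split₀.go (' ' :: rest) cur accs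
              = PySem.Chars.split₀.go rest [] (cur.reverse :: accs) by
            simp [PySem.Chars.split₀.go, hsp, List.isEmpty_iff, hcur]]
        rw [ih [] (cur.reverse :: accs) hrest]
        rw [if_pos rfl, if_neg hcur]
        rw [show (' ' :: rest).takeWhile (· = '1') = [] by simp [List.takeWhile_cons, hne]]
        rw [show (' ' :: rest).dropWhile (· = '1') = ' ' :: rest by
          simp [List.dropWhile_cons, hne]]
        rw [show pvOnesRuns (' ' :: rest) = pvOnesRuns rest by rw [pvOnesRuns, if_neg hne]]
        simp
    · subst hc
      have hsp : PySem.Chars.isspace '1' = false := by decide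
      have hrest : ∀ x ∈ rest, x = ' ' ∨ x = '1' := fun x hx => h x (List.mem_cons_of_mem _ hx)
      rw [show PySem.Chars.split₀.go ('1' :: rest) cur accs
            = PySem.Chars.split₀.go rest ('1' :: cur) accs by
          simp [PySem.Chars.split₀.go, hsp]]
      rw [ih ('1' :: cur) accs hrest, if_neg (by simp)]
      rw [show ('1' :: rest).takeWhile (· = '1') = '1' :: rest.takeWhile (· = '1') by
        simp [List.takeWhile_cons]]
      rw [show ('1' :: rest).dropWhile (· = '1') = rest.dropWhile (· = '1') by
        simp [List.dropWhile_cons]]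
      by_cases hcur : cur = []
      · subst hcur
        rw [if_pos rfl]
        rw [show pvOnesRuns ('1' :: rest)
              = ('1' :: rest.takeWhile (· = '1')) :: pvOnesRuns (rest.dropWhile (· = '1')) by
            rw [pvOnesRuns, if_pos rfl]]
        simp
      · rw [if_neg hcur]
        simp

theorem split₀_masked (cs : List Char) (h : ∀ c ∈ cs, c = ' ' ∨ c = '1') :
    PySem.Chars.split₀ cs = pvOnesRuns cs := by
  rw [PySem.Chars.split₀, split₀_go_masked cs [] [] h]
  simp

-- ===== VERDICT (by name: the statement is the Claim_ definition above) =====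
theorem count_islands_and_isolated_spec : Claim_equal_count_islands_and_isolated := by
  intro n _
  have hmask : ∀ c ∈ (pvFormat08b n).map (fun c => if c = '1' then c else ' '),
      c = ' ' ∨ c = '1' := by
    intro c hc
    rcases List.mem_map.mp hc with ⟨x, _, hx⟩
    by_cases hx1 : x = '1'
    · right; rw [← hx]; simp [hx1]
    · left; rw [← hx]; simp [hx1]
  show count_islands_and_isolated n = count_islands_and_isolated_alt n
  have hA : count_islands_and_isolated n
      = pvFinishA ((pvFormat08b n).foldl pvStepA ((0 : Int), (0 : Int), false, (0 : Int))) := rfl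
  have hB : count_islands_and_isolated_alt n
      = pvScore (PySem.Chars.split₀ ((pvFormat08b n).map (fun c => if c = '1' then c else ' '))) := rfl
  rw [hA, hB, split₀_masked _ hmask]
  rw [← foldA_mask (pvFormat08b n) ((0 : Int), (0 : Int), false, (0 : Int))]
  rw [(foldA_score ((pvFormat08b n).map (fun c => if c = '1' then c else ' ')).length _ le_rfl 0 0).1]
  ring
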